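-- pv_equiv track=rewrite | github.com/filipkloska/CVRP | rmea_utils.py | split_solution_to_plottable
-- ===== SOURCE A (Python) =====
-- def split_solution_to_plottable(solution):
--     routes = []
--     current_route = []
--
--     for point in solution:
--         if point == 0:
--             if current_route:
--                 routes.append([0] + current_route + [0])
--                 current_route = []
--         else:
--             current_route.append(point)
--
--     if current_route:
--         routes.append([0] + current_route + [0])
--
--     return routes
-- ===== SOURCE B (Python) =====
-- def split_solution_to_plottable(solution):
--     routes = []
--     n = len(solution)
--     i = 0
--     while i < n:
--         if solution[i] == 0:
--             i += 1
--         else: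
--             j = i
--             while j < n and solution[j] != 0:
--                 j += 1
--             routes.append([0] + solution[i:j] + [0])
--             i = j
--     return routes
-- ===== Notes on version B (the rewrite author's own statement) =====
-- stated objective: alternative
-- what changed: Replaces the element-by-element accumulator loop with trailing flush by an index scan that locates each maximal non-zero run directly and slices it out, with no pending-route state or post-loop branch.
import Mathlib
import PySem

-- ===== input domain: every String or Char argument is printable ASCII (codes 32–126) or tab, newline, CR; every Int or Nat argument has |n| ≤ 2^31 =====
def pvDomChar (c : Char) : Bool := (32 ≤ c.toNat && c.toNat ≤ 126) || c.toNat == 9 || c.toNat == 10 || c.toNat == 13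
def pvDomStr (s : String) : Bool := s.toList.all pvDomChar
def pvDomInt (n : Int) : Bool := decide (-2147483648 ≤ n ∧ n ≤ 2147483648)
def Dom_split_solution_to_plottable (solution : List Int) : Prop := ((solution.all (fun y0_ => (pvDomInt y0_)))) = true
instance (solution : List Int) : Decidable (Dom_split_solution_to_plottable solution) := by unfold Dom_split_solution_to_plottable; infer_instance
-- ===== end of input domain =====

-- B replaces A's accumulator loop + trailing flush by a direct scan over maximal non-zero runs; alternative decomposition, same cost.
-- ===== PORT A =====
def split_solution_to_plottable (solution : List Int) : List (List Int) :=
  let s := solution.foldl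
    (fun (s : List (List Int) × List Int) point =>
      if point = 0 then
        if s.2 ≠ [] then (s.1 ++ [[0] ++ s.2 ++ [0]], []) else s
      else (s.1, s.2 ++ [point]))
    ([], [])
  if s.2 ≠ [] then s.1 ++ [[0] ++ s.2 ++ [0]] else s.1

-- ===== PORT B =====
-- while loop over indices ported as structural recursion on the remaining suffix:
-- solution[i:j] = takeWhile (· ≠ 0), continuing at i = j is recursing on dropWhile (· ≠ 0).
def split_solution_to_plottable_alt : List Int → List (List Int)
  | [] => []
  | x :: xs =>
    if x = 0 then split_solution_to_plottable_alt xs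
    else ([0] ++ (x :: xs.takeWhile (· ≠ 0)) ++ [0]) :: split_solution_to_plottable_alt (xs.dropWhile (· ≠ 0))
termination_by xs => xs.length
decreasing_by
  · simp
  · have := List.length_dropWhile_le (fun y => decide (y ≠ 0)) xs
    simp at this ⊢
    omega

-- ===== PRECONDITION & SPEC =====
def Spec_split_solution_to_plottable (solution : List Int) (out : List (List Int)) : Prop := out = split_solution_to_plottable_alt solution
instance (solution : List Int) (out : List (List Int)) : Decidable (Spec_split_solution_to_plottable solution out) := by unfold Spec_split_solution_to_plottable; infer_instance

-- ===== CLAIM (what is proved, stated in full; the proofs are below) =====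
def Claim_equal_split_solution_to_plottable : Prop := ∀ (solution : List Int), Dom_split_solution_to_plottable solution → Spec_split_solution_to_plottable solution (split_solution_to_plottable solution)

-- ===== LEMMAS AND PROOFS =====
-- A's loop from state (routes, cur), followed by the trailing flush.
def gA (cur : List Int) : List Int → List (List Int)
  | [] => if cur ≠ [] then [[0] ++ cur ++ [0]] else []
  | x :: xs =>
    if x = 0 then
      (if cur ≠ [] then [[0] ++ cur ++ [0]] else []) ++ gA [] xs
    else gA (cur ++ [x]) xs

lemma foldl_eq_gA (xs : List Int) : ∀ (routes : List (List Int)) (cur : List Int),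
    (let s := xs.foldl
        (fun (s : List (List Int) × List Int) point =>
          if point = 0 then
            if s.2 ≠ [] then (s.1 ++ [[0] ++ s.2 ++ [0]], []) else s
          else (s.1, s.2 ++ [point]))
        (routes, cur)
      if s.2 ≠ [] then s.1 ++ [[0] ++ s.2 ++ [0]] else s.1) = routes ++ gA cur xs := by
  induction xs with
  | nil => intro routes cur; by_cases h : cur = [] <;> simp [gA, h]
  | cons x xs ih =>
    intro routes cur
    by_cases hx : x = 0
    · by_cases hc : cur = []
      · simp only [List.foldl_cons, hx, hc, gA]
        simpa [hc] using ih routes []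
      · simp only [List.foldl_cons, hx, hc, gA, ne_eq, not_false_eq_true, if_true]
        rw [ih (routes ++ [[0] ++ cur ++ [0]]) []]
        simp
    · simp only [List.foldl_cons, hx, gA]
      exact ih routes (cur ++ [x])

lemma gA_eq_alt (xs : List Int) :
    gA [] xs = split_solution_to_plottable_alt xs ∧
    ∀ cur : List Int, cur ≠ [] →
      gA cur xs = ([0] ++ (cur ++ xs.takeWhile (· ≠ 0)) ++ [0]) ::
        split_solution_to_plottable_alt (xs.dropWhile (· ≠ 0)) := by
  induction xs with
  | nil =>
    constructor
    · simp [gA, split_solution_to_plottable_alt]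
    · intro cur hc; simp [gA, hc, split_solution_to_plottable_alt]
  | cons x xs ih =>
    by_cases hx : x = 0
    · subst hx
      constructor
      · simp only [gA]
        simpa [split_solution_to_plottable_alt] using ih.1
      · intro cur hc
        simp only [gA, if_pos hc]
        rw [ih.1]
        simp [split_solution_to_plottable_alt, List.takeWhile, List.dropWhile]
    · constructor
      · simp only [gA, if_neg hx, List.nil_append]
        rw [ih.2 [x] (by simp)]
        simp [split_solution_to_plottable_alt, hx]
      · intro cur hc
        simp only [gA, if_neg hx]
        rw [ih.2 (cur ++ [x]) (by simp)]
        simp [List.takeWhile, List.dropWhile, hx]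

-- ===== VERDICT =====
theorem split_solution_to_plottable_spec : Claim_equal_split_solution_to_plottable := by
  intro solution _
  unfold Spec_split_solution_to_plottable split_solution_to_plottable
  rw [foldl_eq_gA solution [] []]
  simpa using (gA_eq_alt solution).1
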